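-- pv_equiv track=rewrite | github.com/PastyPurpleTrolls/game-contest-server | examples/checkers/test-players/player16.py | jumpNearestKingRow
-- ===== SOURCE A (Python) =====
-- def jumpNearestKingRow(validMoves,validJumps,board,playerIndex,playerTokens,opponentTokens,rowInc):
--     if rowInc>0:
--         kingRow=7
--     else:
--         kingRow=0
--     lst=[]
--
--     closestList = []
--     for jump in validJumps:
--         closestList.append(ord(jump[-2])-65)
--
--     if  closestList != []:
--         if kingRow == 7:
--             lst.append(validJumps[closestList.index(max(closestList))])
--         if kingRow == 0:
--             lst.append(validJumps[closestList.index(min(closestList))])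
--     return lst
-- ===== SOURCE B (Python) =====
-- def jumpNearestKingRow(validMoves, validJumps, board, playerIndex, playerTokens, opponentTokens, rowInc):
--     if not validJumps:
--         return []
--     maximize = rowInc > 0
--     best = validJumps[0]
--     bestv = ord(best[-2]) - 65
--     for jump in validJumps[1:]:
--         v = ord(jump[-2]) - 65
--         if (v > bestv) if maximize else (v < bestv):
--             best = jump
--             bestv = v
--     return [best]
-- ===== Notes on version B (the rewrite author's own statement) =====
-- stated objective: simpler
-- what changed: One linear pass keeping a running best jump with strict comparison (first occurrence of the extreme wins), instead of building a parallel row-value list and doing max/min plus a .index rescan and positional lookup.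
import Mathlib
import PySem

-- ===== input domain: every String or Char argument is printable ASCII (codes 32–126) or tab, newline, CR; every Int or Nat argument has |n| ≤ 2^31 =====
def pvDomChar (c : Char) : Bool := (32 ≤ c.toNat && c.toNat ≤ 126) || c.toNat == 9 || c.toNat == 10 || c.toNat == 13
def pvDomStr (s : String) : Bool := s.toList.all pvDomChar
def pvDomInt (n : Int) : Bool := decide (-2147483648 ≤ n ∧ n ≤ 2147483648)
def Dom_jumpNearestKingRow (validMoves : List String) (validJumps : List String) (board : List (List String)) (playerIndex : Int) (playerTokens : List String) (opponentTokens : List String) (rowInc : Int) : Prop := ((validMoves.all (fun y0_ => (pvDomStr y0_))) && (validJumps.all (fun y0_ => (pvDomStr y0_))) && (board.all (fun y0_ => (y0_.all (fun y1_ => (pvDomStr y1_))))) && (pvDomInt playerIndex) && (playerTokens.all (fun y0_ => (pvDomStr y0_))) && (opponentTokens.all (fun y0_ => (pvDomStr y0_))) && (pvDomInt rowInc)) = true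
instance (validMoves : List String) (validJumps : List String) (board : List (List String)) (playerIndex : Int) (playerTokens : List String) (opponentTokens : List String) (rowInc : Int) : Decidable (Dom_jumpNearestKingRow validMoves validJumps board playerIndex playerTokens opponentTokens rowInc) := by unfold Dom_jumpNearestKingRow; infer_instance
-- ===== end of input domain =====

-- B replaces A's parallel row-value list + max/min + .index rescan + positional lookup
-- by one pass keeping a running best jump (strict comparison = first extreme wins).
-- Pre_ excludes jump strings shorter than 2 characters, on which Python A raises IndexError at jump[-2].

-- ===== PORT A =====
-- ord(jump[-2]) - 65; used verbatim by both Python versions. Default 'A' is never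
-- reached under Pre_ (every jump has length >= 2).
def pvRowVal (jump : String) : Int :=
  ((PySem.List.pyGetD jump.toList (-2) 'A').toNat : Int) - 65

def jumpNearestKingRow (validMoves : List String) (validJumps : List String) (board : List (List String)) (playerIndex : Int) (playerTokens : List String) (opponentTokens : List String) (rowInc : Int) : List String :=
  let kingRow : Int := if rowInc > 0 then 7 else 0
  let lst : List String := []
  let closestList : List Int :=
    validJumps.foldl (fun acc jump => acc ++ [pvRowVal jump]) []
  if closestList ≠ [] then
    let lst := if kingRow = 7 then
        match PySem.List.max? closestList (fun x => x) with
        | some m =>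
          match PySem.List.index? closestList m with
          | some i => lst ++ [PySem.List.pyGetD validJumps (i : Int) ""]
          | none => lst     -- unreachable: the max is in the list
        | none => lst       -- unreachable: closestList is nonempty
      else lst
    let lst := if kingRow = 0 then
        match PySem.List.min? closestList (fun x => x) with
        | some m =>
          match PySem.List.index? closestList m with
          | some i => lst ++ [PySem.List.pyGetD validJumps (i : Int) ""]
          | none => lst     -- unreachable
        | none => lst       -- unreachable
      else lst
    lst
  else lst

-- ===== PORT B =====
-- the loop "for jump in validJumps[1:]" carrying (best, bestv)
def pvGo (maximize : Bool) (best : String) (bestv : Int) : List String → String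
  | [] => best
  | jump :: rest =>
    let v := pvRowVal jump
    if (if maximize then bestv < v else v < bestv) then pvGo maximize jump v rest
    else pvGo maximize best bestv rest

def jumpNearestKingRow_alt (validMoves : List String) (validJumps : List String) (board : List (List String)) (playerIndex : Int) (playerTokens : List String) (opponentTokens : List String) (rowInc : Int) : List String :=
  match validJumps with
  | [] => []
  | best :: rest =>   -- best = validJumps[0], rest = validJumps[1:]
    [pvGo (decide (rowInc > 0)) best (pvRowVal best) rest]

-- ===== PRECONDITION & SPEC =====
-- Pre_ excludes jump strings shorter than 2 characters: there Python A raises IndexError at jump[-2].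
def Pre_jumpNearestKingRow (validMoves : List String) (validJumps : List String) (board : List (List String)) (playerIndex : Int) (playerTokens : List String) (opponentTokens : List String) (rowInc : Int) : Prop :=
  ∀ jump ∈ validJumps, 2 ≤ jump.toList.length
instance (validMoves : List String) (validJumps : List String) (board : List (List String)) (playerIndex : Int) (playerTokens : List String) (opponentTokens : List String) (rowInc : Int) : Decidable (Pre_jumpNearestKingRow validMoves validJumps board playerIndex playerTokens opponentTokens rowInc) := by unfold Pre_jumpNearestKingRow; infer_instance

def pvWitness_jumpNearestKingRow : List String × List String × List (List String) × Int × List String × List String × Int :=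
  ([], ["C3", "F6"], [], 0, [], [], 1)

def Spec_jumpNearestKingRow (validMoves : List String) (validJumps : List String) (board : List (List String)) (playerIndex : Int) (playerTokens : List String) (opponentTokens : List String) (rowInc : Int) (out : List String) : Prop := out = jumpNearestKingRow_alt validMoves validJumps board playerIndex playerTokens opponentTokens rowInc
instance (validMoves : List String) (validJumps : List String) (board : List (List String)) (playerIndex : Int) (playerTokens : List String) (opponentTokens : List String) (rowInc : Int) (out : List String) : Decidable (Spec_jumpNearestKingRow validMoves validJumps board playerIndex playerTokens opponentTokens rowInc out) := by unfold Spec_jumpNearestKingRow; infer_instance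

-- ===== CLAIM (what is proved, stated in full; the proofs are below) =====
def Claim_equal_jumpNearestKingRow : Prop := ∀ (validMoves : List String) (validJumps : List String) (board : List (List String)) (playerIndex : Int) (playerTokens : List String) (opponentTokens : List String) (rowInc : Int), Dom_jumpNearestKingRow validMoves validJumps board playerIndex playerTokens opponentTokens rowInc → Pre_jumpNearestKingRow validMoves validJumps board playerIndex playerTokens opponentTokens rowInc → Spec_jumpNearestKingRow validMoves validJumps board playerIndex playerTokens opponentTokens rowInc (jumpNearestKingRow validMoves validJumps board playerIndex playerTokens opponentTokens rowInc)

-- ===== LEMMAS AND PROOFS =====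

theorem pvWitness_ok : Dom_jumpNearestKingRow pvWitness_jumpNearestKingRow.1 pvWitness_jumpNearestKingRow.2.1 pvWitness_jumpNearestKingRow.2.2.1 pvWitness_jumpNearestKingRow.2.2.2.1 pvWitness_jumpNearestKingRow.2.2.2.2.1 pvWitness_jumpNearestKingRow.2.2.2.2.2.1 pvWitness_jumpNearestKingRow.2.2.2.2.2.2 ∧ Pre_jumpNearestKingRow pvWitness_jumpNearestKingRow.1 pvWitness_jumpNearestKingRow.2.1 pvWitness_jumpNearestKingRow.2.2.1 pvWitness_jumpNearestKingRow.2.2.2.1 pvWitness_jumpNearestKingRow.2.2.2.2.1 pvWitness_jumpNearestKingRow.2.2.2.2.2.1 pvWitness_jumpNearestKingRow.2.2.2.2.2.2 := by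
  constructor <;> decide

theorem pv_foldl_min_le (l : List Int) (x : Int) : l.foldl min x ≤ x := by
  induction l generalizing x with
  | nil => exact le_refl x
  | cons a l ih => exact le_trans (ih (min x a)) (min_le_left x a)

theorem pvGo_max (t : List String) : ∀ h : String,
    ∃ i : Nat, PySem.List.index? (pvRowVal h :: t.map pvRowVal) ((t.map pvRowVal).foldl max (pvRowVal h)) = some i ∧
      List.getD (h :: t) i "" = pvGo true h (pvRowVal h) t := by
  induction t with
  | nil =>
    intro h
    exact ⟨0, PySem.List.index?_cons_self .., by simp [pvGo]⟩
  | cons j t' ih =>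
    intro h
    simp only [List.map_cons, List.foldl_cons]
    by_cases hc : pvRowVal h < pvRowVal j
    · rw [max_eq_right (le_of_lt hc)]
      obtain ⟨i0, hidx, hval⟩ := ih j
      have hm := (PySem.List.le_foldl_max (t'.map pvRowVal) (pvRowVal j)).1
      have hne : pvRowVal h ≠ (t'.map pvRowVal).foldl max (pvRowVal j) := by omega
      refine ⟨i0 + 1, ?_, ?_⟩
      · rw [PySem.List.index?_cons_of_ne _ hne]
        rw [hidx]; rfl
      · simpa [pvGo, hc] using hval
    · rw [max_eq_left (not_lt.mp hc)]
      obtain ⟨i0, hidx, hval⟩ := ih h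
      by_cases he : pvRowVal h = (t'.map pvRowVal).foldl max (pvRowVal h)
      · rw [← he] at hidx ⊢
        rw [PySem.List.index?_cons_self] at hidx
        injection hidx with hi0
        refine ⟨0, PySem.List.index?_cons_self .., ?_⟩
        rw [← hi0] at hval
        simpa [pvGo, hc] using hval
      · have hm := (PySem.List.le_foldl_max (t'.map pvRowVal) (pvRowVal h)).1
        have hlt : pvRowVal h < (t'.map pvRowVal).foldl max (pvRowVal h) := lt_of_le_of_ne hm he
        have hnej : pvRowVal j ≠ (t'.map pvRowVal).foldl max (pvRowVal h) := by omega
        rw [PySem.List.index?_cons_of_ne _ he] at hidx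
        obtain ⟨i1, hi1, hio⟩ := Option.map_eq_some_iff.mp hidx
        refine ⟨i1 + 2, ?_, ?_⟩
        · rw [PySem.List.index?_cons_of_ne _ he, PySem.List.index?_cons_of_ne _ hnej, hi1]
          rfl
        · rw [← hio] at hval
          simpa [pvGo, hc] using hval

theorem pvGo_min (t : List String) : ∀ h : String,
    ∃ i : Nat, PySem.List.index? (pvRowVal h :: t.map pvRowVal) ((t.map pvRowVal).foldl min (pvRowVal h)) = some i ∧
      List.getD (h :: t) i "" = pvGo false h (pvRowVal h) t := by
  induction t with
  | nil =>
    intro h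
    exact ⟨0, PySem.List.index?_cons_self .., by simp [pvGo]⟩
  | cons j t' ih =>
    intro h
    simp only [List.map_cons, List.foldl_cons]
    by_cases hc : pvRowVal j < pvRowVal h
    · rw [min_eq_right (le_of_lt hc)]
      obtain ⟨i0, hidx, hval⟩ := ih j
      have hm := pv_foldl_min_le (t'.map pvRowVal) (pvRowVal j)
      have hne : pvRowVal h ≠ (t'.map pvRowVal).foldl min (pvRowVal j) := by omega
      refine ⟨i0 + 1, ?_, ?_⟩
      · rw [PySem.List.index?_cons_of_ne _ hne]
        rw [hidx]; rfl
      · simpa [pvGo, hc] using hval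
    · rw [min_eq_left (not_lt.mp hc)]
      obtain ⟨i0, hidx, hval⟩ := ih h
      by_cases he : pvRowVal h = (t'.map pvRowVal).foldl min (pvRowVal h)
      · rw [← he] at hidx ⊢
        rw [PySem.List.index?_cons_self] at hidx
        injection hidx with hi0
        refine ⟨0, PySem.List.index?_cons_self .., ?_⟩
        rw [← hi0] at hval
        simpa [pvGo, hc] using hval
      · have hm := pv_foldl_min_le (t'.map pvRowVal) (pvRowVal h)
        have hlt : (t'.map pvRowVal).foldl min (pvRowVal h) < pvRowVal h := lt_of_le_of_ne hm (Ne.symm he)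
        have hnej : pvRowVal j ≠ (t'.map pvRowVal).foldl min (pvRowVal h) := by omega
        rw [PySem.List.index?_cons_of_ne _ he] at hidx
        obtain ⟨i1, hi1, hio⟩ := Option.map_eq_some_iff.mp hidx
        refine ⟨i1 + 2, ?_, ?_⟩
        · rw [PySem.List.index?_cons_of_ne _ he, PySem.List.index?_cons_of_ne _ hnej, hi1]
          rfl
        · rw [← hio] at hval
          simpa [pvGo, hc] using hval

-- ===== VERDICT (by name: the statement is the Claim_ definition above) =====
theorem jumpNearestKingRow_spec : Claim_equal_jumpNearestKingRow := by
  intro validMoves validJumps board playerIndex playerTokens opponentTokens rowInc _ _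
  unfold Spec_jumpNearestKingRow jumpNearestKingRow jumpNearestKingRow_alt
  cases validJumps with
  | nil => simp
  | cons h t =>
    rw [PySem.List.foldl_append_singleton_eq_map]
    by_cases hr : rowInc > 0
    · obtain ⟨i, hidx, hval⟩ := pvGo_max t h
      rw [PySem.List.index?_eq_idxOf?] at hidx
      simp only [List.getD] at hval
      simp [hr, PySem.List.max?_id_cons, hidx, hval]
    · obtain ⟨i, hidx, hval⟩ := pvGo_min t h
      rw [PySem.List.index?_eq_idxOf?] at hidx
      simp only [List.getD] at hval
      simp [hr, PySem.List.min?_id_cons, hidx, hval]
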